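-- pv_equiv track=rewrite | github.com/aadam19/filtered-vector-search | src/planner.py | _split_query_budget
-- ===== SOURCE A (Python) =====
-- def _split_query_budget(total_queries: int, buckets: int) -> list[int]:
--     total_queries = int(total_queries)
--     buckets = int(buckets)
--     if total_queries <= 0:
--         raise ValueError(f"total_queries must be > 0, got {total_queries}")
--     if buckets <= 0:
--         raise ValueError(f"buckets must be > 0, got {buckets}")
--
--     base = total_queries // buckets
--     remainder = total_queries % buckets
--     return [base + (1 if idx < remainder else 0) for idx in range(buckets)]
-- ===== SOURCE B (Python) =====
-- def _split_query_budget(total_queries: int, buckets: int) -> list[int]: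
--     total_queries = int(total_queries)
--     buckets = int(buckets)
--     if total_queries <= 0:
--         raise ValueError(f"total_queries must be > 0, got {total_queries}")
--     if buckets <= 0:
--         raise ValueError(f"buckets must be > 0, got {buckets}")
--
--     parts = []
--     remaining = total_queries
--     left = buckets
--     while left > 0:
--         share = -(-remaining // left)  # ceil: this bucket takes its fair share of what remains
--         parts.append(share)
--         remaining -= share
--         left -= 1
--     return parts
-- ===== Notes on version B (the rewrite author's own statement) =====
-- stated objective: alternative
-- what changed: Instead of one divmod deciding which indices get base+1, B peels buckets one at a time: each bucket takes the ceiling share of the remaining budget over the remaining buckets, maintaining (remaining, left) accumulators; correct because ceil(q/l) equals base+1 exactly while the remainder is unexhausted.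
import Mathlib
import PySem

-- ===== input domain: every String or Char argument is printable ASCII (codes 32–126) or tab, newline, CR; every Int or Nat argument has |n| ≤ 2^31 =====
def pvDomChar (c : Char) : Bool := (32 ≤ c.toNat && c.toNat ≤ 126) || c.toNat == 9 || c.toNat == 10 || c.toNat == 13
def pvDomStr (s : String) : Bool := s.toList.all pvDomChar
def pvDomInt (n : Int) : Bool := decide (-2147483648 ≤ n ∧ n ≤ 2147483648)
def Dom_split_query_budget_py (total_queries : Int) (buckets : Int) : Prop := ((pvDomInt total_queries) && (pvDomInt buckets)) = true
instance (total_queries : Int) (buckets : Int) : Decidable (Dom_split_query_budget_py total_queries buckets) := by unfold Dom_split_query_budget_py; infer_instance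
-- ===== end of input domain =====

-- B peels buckets one at a time, each taking the ceiling share of the remaining budget (alternative decomposition, same cost); A's ValueError inputs are excluded by Pre_.


-- ===== PORT A =====
-- literal port of A's comprehension [base + (1 if idx < remainder else 0) for idx in range(buckets)]
def split_query_budget_py (total_queries : Int) (buckets : Int) : List Int :=
  let base := PySem.Int.floordiv total_queries buckets
  let remainder := PySem.Int.mod total_queries buckets
  (PySem.List.pyRange 0 buckets 1).map (fun idx => base + (if idx < remainder then 1 else 0))

-- ===== PORT B =====
-- the while loop: 'left' counts down, each step appends share = -(-remaining // left)
def splitGo (remaining : Int) : Nat → List Int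
  | 0 => []
  | n + 1 =>
    let share := -(PySem.Int.floordiv (-remaining) ((n : Int) + 1))
    share :: splitGo (remaining - share) n

def split_query_budget_py_alt (total_queries : Int) (buckets : Int) : List Int :=
  splitGo total_queries buckets.toNat

-- ===== PRECONDITION & SPEC =====
-- A raises ValueError exactly when total_queries ≤ 0 or buckets ≤ 0; those inputs are excluded.
def Pre_split_query_budget_py (total_queries : Int) (buckets : Int) : Prop :=
  0 < total_queries ∧ 0 < buckets
instance (total_queries : Int) (buckets : Int) : Decidable (Pre_split_query_budget_py total_queries buckets) := by unfold Pre_split_query_budget_py; infer_instance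

def pvWitness_split_query_budget_py : Int × Int := (7, 3)

def Spec_split_query_budget_py (total_queries : Int) (buckets : Int) (out : List Int) : Prop := out = split_query_budget_py_alt total_queries buckets
instance (total_queries : Int) (buckets : Int) (out : List Int) : Decidable (Spec_split_query_budget_py total_queries buckets out) := by unfold Spec_split_query_budget_py; infer_instance

-- ===== CLAIM =====
def Claim_equal_split_query_budget_py : Prop := ∀ (total_queries : Int) (buckets : Int), Dom_split_query_budget_py total_queries buckets → Pre_split_query_budget_py total_queries buckets → Spec_split_query_budget_py total_queries buckets (split_query_budget_py total_queries buckets)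

-- ===== LEMMAS AND PROOFS =====

-- the peeling loop computes exactly A's per-index formula over n buckets, for every integer budget t
theorem splitGo_eq (n : Nat) : ∀ t : Int,
    splitGo t n = (PySem.List.pyRange 0 (n : Int) 1).map
      (fun idx => PySem.Int.floordiv t (n : Int) + (if idx < PySem.Int.mod t (n : Int) then 1 else 0)) := by
  induction n with
  | zero => intro t; simp [splitGo, PySem.List.pyRange]
  | succ n ih =>
    intro t
    have hm0 : (0:Int) < (n : Int) + 1 := by positivity
    obtain ⟨base, hbase⟩ : ∃ x, PySem.Int.floordiv t ((n:Int)+1) = x := ⟨_, rfl⟩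
    obtain ⟨r, hrdef⟩ : ∃ x, PySem.Int.mod t ((n:Int)+1) = x := ⟨_, rfl⟩
    have ht : base * ((n:Int)+1) + r = t := by
      rw [← hbase, ← hrdef]; exact PySem.Int.floordiv_mul_add_mod t _
    have hr0 : 0 ≤ r := hrdef ▸ PySem.Int.mod_nonneg t hm0
    have hrm : r < (n:Int)+1 := hrdef ▸ PySem.Int.mod_lt t hm0
    have hshare : -(PySem.Int.floordiv (-t) ((n:Int)+1)) = base + (if (0:Int) < r then 1 else 0) := by
      rw [PySem.Int.neg_floordiv_neg_eq_iff_of_pos hm0]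
      refine ⟨?_, ?_⟩ <;> split_ifs with h <;> nlinarith [ht]
    rw [show splitGo t (n+1)
        = -(PySem.Int.floordiv (-t) ((n:Int)+1))
          :: splitGo (t - -(PySem.Int.floordiv (-t) ((n:Int)+1))) n from rfl]
    rw [hshare]
    have hcast : (((n+1 : Nat)) : Int) = (n:Int) + 1 := by push_cast; ring
    rw [hcast, PySem.List.pyRange_one_cons hm0, List.map_cons]
    congr 1
    · rw [hbase, hrdef]
    · rw [ih, hbase, hrdef]
      rcases Nat.eq_zero_or_pos n with hn | hn
      · subst hn; simp [PySem.List.pyRange]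
      have hn0 : (0:Int) < (n:Int) := by exact_mod_cast hn
      have hexp : base * ((n:Int)+1) = base * (n:Int) + base := by ring
      have hbase' : PySem.Int.floordiv (t - (base + (if (0:Int) < r then 1 else 0))) (n:Int) = base := by
        rw [PySem.Int.floordiv_eq_iff_of_pos hn0]
        refine ⟨?_, ?_⟩ <;> split_ifs with h <;> nlinarith [ht, hexp]
      have hmod' : PySem.Int.mod (t - (base + (if (0:Int) < r then 1 else 0))) (n:Int)
          = r - (if (0:Int) < r then 1 else 0) := by
        have h2 := PySem.Int.floordiv_mul_add_mod (t - (base + (if (0:Int) < r then 1 else 0))) (n:Int)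
        rw [hbase'] at h2
        split_ifs at h2 ⊢ with h <;> linarith [ht, hexp, h2]
      rw [hbase', hmod']
      rw [PySem.List.pyRange_one, PySem.List.pyRange_one]
      have h1 : (((n:Int) + 1 - (0 + 1)).toNat) = n := by omega
      have h2 : (((n:Int) - 0).toNat) = n := by omega
      rw [h1, h2, List.map_map, List.map_map]
      apply List.map_congr_left
      intro k hk
      simp only [Function.comp]
      congr 1
      split_ifs with ha hb hc <;> omega

-- ===== VERDICT =====
theorem split_query_budget_py_spec : Claim_equal_split_query_budget_py := by
  intro t b _ hpre
  obtain ⟨ht, hb⟩ := hpre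
  unfold Spec_split_query_budget_py split_query_budget_py split_query_budget_py_alt
  rw [splitGo_eq]
  have hcb : ((b.toNat : Nat) : Int) = b := by omega
  rw [hcb]
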